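-- pv_equiv track=rewrite | github.com/alias-pyking/InterviewPrep | competitive_programming/cf/DIV2C/special_offer_super_price_with_999.py | cnt_9
-- ===== SOURCE A (Python) =====
-- def cnt_9(string):
-- 	i, ans = len(string) - 1, 0
-- 	while i >= 0:
-- 		if string[i] == '9':
-- 			ans += 1
-- 		else: break
-- 		i -= 1
-- 	return ans
-- ===== SOURCE B (Python) =====
-- def cnt_9(string):
-- 	run = 0
-- 	for c in string:
-- 		run = run + 1 if c == '9' else 0
-- 	return run
-- ===== Notes on version B (the rewrite author's own statement) =====
-- stated objective: alternative
-- what changed: Replaces A's backward scan from the end with a break by a single forward pass that maintains the current run length of consecutive '9's, resetting to 0 on any other character; the final run length is the count of trailing nines.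
import Mathlib
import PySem

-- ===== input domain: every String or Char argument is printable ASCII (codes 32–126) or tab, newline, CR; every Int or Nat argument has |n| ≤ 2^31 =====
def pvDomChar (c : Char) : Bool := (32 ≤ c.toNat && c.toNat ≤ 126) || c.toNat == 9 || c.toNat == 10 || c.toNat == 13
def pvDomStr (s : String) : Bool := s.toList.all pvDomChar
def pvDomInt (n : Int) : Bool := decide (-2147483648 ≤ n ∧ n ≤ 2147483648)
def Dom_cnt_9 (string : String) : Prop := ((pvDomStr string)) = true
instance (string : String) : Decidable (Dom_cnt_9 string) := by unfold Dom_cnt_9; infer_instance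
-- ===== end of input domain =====

-- B replaces A's backward break-loop by one forward pass keeping the current run of '9's (alternative decomposition).

-- ===== PORT A =====
-- the while loop 'i = len-1; while i >= 0: …; i -= 1' transliterated with k = i + 1
def cnt_9_go (cs : List Char) : Nat → Int → Int
  | 0, ans => ans
  | k + 1, ans =>
      if PySem.List.pyGet? cs (k : Int) = some '9' then cnt_9_go cs k (ans + 1)
      else ans

def cnt_9 (string : String) : Int := cnt_9_go string.toList string.toList.length 0

-- ===== PORT B =====
-- 'run = run + 1 if c == '9' else 0' over the characters, front to back
def cnt_9_alt (string : String) : Int :=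
  string.toList.foldl (fun run c => if c = '9' then run + 1 else 0) 0

-- ===== PRECONDITION & SPEC =====
def Spec_cnt_9 (string : String) (out : Int) : Prop := out = cnt_9_alt string
instance (string : String) (out : Int) : Decidable (Spec_cnt_9 string out) := by unfold Spec_cnt_9; infer_instance

-- ===== CLAIM (what is proved, stated in full; the proofs are below) =====
def Claim_equal_cnt_9 : Prop := ∀ (string : String), Dom_cnt_9 string → Spec_cnt_9 string (cnt_9 string)

-- ===== LEMMAS AND PROOFS =====

lemma cnt_9_go_eq (cs : List Char) (k : Nat) (hk : k ≤ cs.length) (ans : Int) :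
    cnt_9_go cs k ans = ans + ((cs.take k).reverse.takeWhile (· == '9')).length := by
  induction k generalizing ans with
  | zero => simp [cnt_9_go]
  | succ k ih =>
    have hklt : k < cs.length := hk
    have hget : PySem.List.pyGet? cs ((k : Nat) : Int) = cs[k]? := by
      simp [PySem.List.pyGet?_natCast]
    have hrev : (cs.take (k + 1)).reverse = cs[k] :: (cs.take k).reverse := by
      rw [List.take_add_one, List.getElem?_eq_getElem hklt]
      simp
    simp only [cnt_9_go, hget, List.getElem?_eq_getElem hklt, hrev, List.takeWhile_cons]
    by_cases h9 : cs[k] = '9'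
    · rw [if_pos (by simp [h9]), if_pos (by simp [h9]), ih (Nat.le_of_lt hklt)]
      simp only [List.length_cons]
      push_cast
      ring
    · rw [if_neg (by simp [h9]), if_neg (by simp [h9])]
      simp

-- the forward fold computes: full run length plus the seed if the list is all '9's, else the trailing-'9' run
lemma foldl_run_eq (cs : List Char) (a : Int) :
    cs.foldl (fun run c => if c = '9' then run + 1 else 0) a =
      if cs.all (· == '9') then a + cs.length
      else ((cs.reverse.takeWhile (· == '9')).length : Int) := by
  induction cs using List.reverseRecOn generalizing a with
  | nil => simp
  | append_singleton l c ih =>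
    rw [List.foldl_append]
    simp only [List.foldl_cons, List.foldl_nil, List.reverse_append, List.reverse_singleton,
      List.singleton_append, List.takeWhile_cons, List.all_append, List.all_cons, List.all_nil]
    by_cases h9 : c = '9'
    · rw [if_pos h9, ih]
      by_cases hall : l.all (· == '9')
      · simp [hall, h9]
        push_cast; ring
      · simp [hall, h9]
    · simp [h9]

-- ===== VERDICT (by name: the statement is the Claim_ definition above) =====
theorem cnt_9_spec : Claim_equal_cnt_9 := by
  intro s _
  show cnt_9 s = cnt_9_alt s
  unfold cnt_9 cnt_9_alt
  rw [cnt_9_go_eq s.toList s.toList.length le_rfl 0, List.take_length, foldl_run_eq]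
  by_cases hall : s.toList.all (· == '9')
  · have : s.toList.reverse.takeWhile (· == '9') = s.toList.reverse := by
      apply List.takeWhile_eq_self_iff.mpr
      intro c hc
      exact (List.all_eq_true.mp hall) c (List.mem_reverse.mp hc)
    simp [hall, this]
  · simp [hall]
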